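-- pv_equiv track=rewrite | github.com/AthharPro/zypher | python-scanner/zypher_scanner/scanner/rules/rule_insecure_system_configuration.py | _find_job_services_line
-- ===== SOURCE A (Python) =====
-- from typing import List, Dict, Any, Optional
--
-- def _find_job_services_line(file_lines: List[str], job_name: str, service_index: int) -> int:
--     """
--     Find the line number for a specific service in a job.
--
--     Args:
--         file_lines: The file lines
--         job_name: Name of the job
--         service_index: Index of the service in the job
--
--     Returns:
--         Line number if found, -1 otherwise
--     """
--     job_line = -1
--     services_line = -1
--     service_count = -1
--
--     # Find job line
--     for i, line in enumerate(file_lines):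
--         if line.strip().startswith(f"{job_name}:"):
--             job_line = i
--             break
--
--     if job_line < 0:
--         return -1
--
--     # Find services line
--     for i in range(job_line, len(file_lines)):
--         if "services:" in file_lines[i]:
--             services_line = i
--             break
--
--     if services_line < 0:
--         return -1
--
--     # Count services until we reach service_index
--     for i in range(services_line + 1, len(file_lines)):
--         if file_lines[i].strip().startswith("- "):
--             service_count += 1
--             if service_count == service_index:
--                 return i
--
--     return -1
-- ===== SOURCE B (Python) =====
-- def _find_job_services_line(file_lines, job_name, service_index):
--     """Single pass over the lines driven by a small state machine
--     (0 = seek job, 1 = seek services, 2 = count services)."""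
--     state = 0
--     count = -1
--     prefix = f"{job_name}:"
--     for i, line in enumerate(file_lines):
--         if state == 0 and line.strip().startswith(prefix):
--             state = 1
--         if state == 1 and "services:" in line:
--             state = 2
--             continue
--         if state == 2 and line.strip().startswith("- "):
--             count += 1
--             if count == service_index:
--                 return i
--     return -1
-- ===== Notes on version B (the rewrite author's own statement) =====
-- stated objective: alternative
-- what changed: Replaces A's three sequential index-based scans (find job line, find 'services:' from there, count '- ' entries after it) with one pass over enumerate(file_lines) driven by a 3-valued state variable and a counter, hoisting the f-string job prefix out of the loop.
import Mathlib
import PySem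

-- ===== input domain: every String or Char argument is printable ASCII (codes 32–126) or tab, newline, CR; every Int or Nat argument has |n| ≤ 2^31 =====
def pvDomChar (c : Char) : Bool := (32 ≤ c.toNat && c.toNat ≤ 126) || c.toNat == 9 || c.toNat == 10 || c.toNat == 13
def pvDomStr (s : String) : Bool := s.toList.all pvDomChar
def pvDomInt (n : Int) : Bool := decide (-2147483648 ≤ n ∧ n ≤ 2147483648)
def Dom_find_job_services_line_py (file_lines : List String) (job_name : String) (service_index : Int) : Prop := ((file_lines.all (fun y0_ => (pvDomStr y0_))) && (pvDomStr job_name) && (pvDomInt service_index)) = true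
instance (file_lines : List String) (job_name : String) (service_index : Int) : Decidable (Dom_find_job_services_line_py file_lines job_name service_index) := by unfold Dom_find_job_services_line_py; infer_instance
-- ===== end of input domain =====

-- B replaces A's three sequential scans by one pass with a 3-state machine; objective: alternative decomposition (same cost).

-- shared line predicates (the exact Python tests both versions perform)
-- line.strip().startswith(f"{job_name}:")
def pvJobLine (job_name : String) (l : String) : Bool :=
  PySem.Chars.startswith (PySem.Chars.strip l.toList) (job_name.toList ++ [':'])
-- "services:" in line
def pvServLine (l : String) : Bool := PySem.Str.isIn "services:" l
-- line.strip().startswith("- ")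
def pvDashLine (l : String) : Bool :=
  PySem.Chars.startswith (PySem.Chars.strip l.toList) ['-', ' ']

-- ===== PORT A =====
-- first 'for … break' scan, carrying the absolute index (used for both the
-- enumerate loop and the 'for i in range(job_line, len(file_lines))' loop,
-- which reads exactly the suffix file_lines[job_line:])
def pvAFind (p : String → Bool) : List String → Nat → Option Nat
  | [], _ => none
  | l :: ls, i => if p l then some i else pvAFind p ls (i + 1)

-- third loop: count '- ' lines until service_count == service_index
def pvACount (service_index : Int) : List String → Int → Int → Int
  | [], _, _ => -1
  | l :: ls, i, c =>
    if pvDashLine l then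
      if c + 1 = service_index then i else pvACount service_index ls (i + 1) (c + 1)
    else pvACount service_index ls (i + 1) c

def find_job_services_line_py (file_lines : List String) (job_name : String) (service_index : Int) : Int :=
  match pvAFind (pvJobLine job_name) file_lines 0 with
  | none => -1
  | some job_line =>
    match pvAFind pvServLine (file_lines.drop job_line) job_line with
    | none => -1
    | some services_line =>
      pvACount service_index (file_lines.drop (services_line + 1)) ((services_line : Int) + 1) (-1)

-- ===== PORT B =====
-- one pass: state 0 = seek job, 1 = seek services, 2 = count
def pvBLoop (job_name : String) (service_index : Int) : List String → Int → Nat → Int → Int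
  | [], _, _, _ => -1
  | l :: ls, i, st, c =>
    let st1 := if st = 0 ∧ pvJobLine job_name l = true then 1 else st
    if st1 = 1 ∧ pvServLine l = true then pvBLoop job_name service_index ls (i + 1) 2 c
    else if st1 = 2 ∧ pvDashLine l = true then
      if c + 1 = service_index then i else pvBLoop job_name service_index ls (i + 1) st1 (c + 1)
    else pvBLoop job_name service_index ls (i + 1) st1 c

def find_job_services_line_py_alt (file_lines : List String) (job_name : String) (service_index : Int) : Int :=
  pvBLoop job_name service_index file_lines 0 0 (-1)

-- ===== PRECONDITION & SPEC =====
def Spec_find_job_services_line_py (file_lines : List String) (job_name : String) (service_index : Int) (out : Int) : Prop := out = find_job_services_line_py_alt file_lines job_name service_index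
instance (file_lines : List String) (job_name : String) (service_index : Int) (out : Int) : Decidable (Spec_find_job_services_line_py file_lines job_name service_index out) := by unfold Spec_find_job_services_line_py; infer_instance

-- ===== CLAIM (what is proved, stated in full; the proofs are below) =====
def Claim_equal_find_job_services_line_py : Prop := ∀ (file_lines : List String) (job_name : String) (service_index : Int), Dom_find_job_services_line_py file_lines job_name service_index → Spec_find_job_services_line_py file_lines job_name service_index (find_job_services_line_py file_lines job_name service_index)

-- ===== LEMMAS AND PROOFS =====

theorem pvAFind_shift (p : String → Bool) (ls : List String) (n : Nat) :
    pvAFind p ls n = (pvAFind p ls 0).map (· + n) := by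
  induction ls generalizing n with
  | nil => simp [pvAFind]
  | cons l ls ih =>
    by_cases h : p l = true
    · simp [pvAFind, h]
    · simp only [pvAFind, h, if_neg, Bool.not_eq_true] at *
      rw [ih (n + 1), ih 1]
      cases pvAFind p ls 0
      · simp
      · simp; omega

theorem pvBLoop_state2 (jn : String) (si : Int) (ls : List String) (i c : Int) :
    pvBLoop jn si ls i 2 c = pvACount si ls i c := by
  induction ls generalizing i c with
  | nil => rfl
  | cons l ls ih =>
    simp only [pvBLoop, pvACount]
    by_cases hd : pvDashLine l = true <;> by_cases hc : c + 1 = si <;>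
      simp [hd, hc, ih]

theorem pvBLoop_state1 (jn : String) (si : Int) (ls : List String) (i : Int) :
    pvBLoop jn si ls i 1 (-1) =
      (match pvAFind pvServLine ls 0 with
       | none => -1
       | some k => pvACount si (ls.drop (k + 1)) (i + k + 1) (-1)) := by
  induction ls generalizing i with
  | nil => rfl
  | cons l ls ih =>
    by_cases hs : pvServLine l = true
    · simp [pvBLoop, pvAFind, hs, pvBLoop_state2]
    · simp only [pvBLoop, pvAFind, hs]
      norm_num
      rw [ih (i + 1), pvAFind_shift pvServLine ls 1]
      cases pvAFind pvServLine ls 0 with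
      | none => rfl
      | some k =>
        simp only [Option.map_some]
        congr 1
        push_cast
        ring

theorem pvBLoop_state0 (jn : String) (si : Int) (ls : List String) (i : Int) :
    pvBLoop jn si ls i 0 (-1) =
      (match pvAFind (pvJobLine jn) ls 0 with
       | none => -1
       | some j => pvBLoop jn si (ls.drop j) (i + j) 1 (-1)) := by
  induction ls generalizing i with
  | nil => rfl
  | cons l ls ih =>
    by_cases hj : pvJobLine jn l = true
    · simp only [pvAFind, hj, if_pos]
      conv_rhs => rw [pvBLoop.eq_def]
      simp only [pvBLoop, hj]
      norm_num
    · simp only [pvBLoop, pvAFind, hj]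
      norm_num
      rw [ih (i + 1), pvAFind_shift (pvJobLine jn) ls 1]
      cases pvAFind (pvJobLine jn) ls 0 with
      | none => rfl
      | some j =>
        simp only [Option.map_some]
        congr 1
        push_cast
        ring

-- ===== VERDICT (by name: the statement is the Claim_ definition above) =====
theorem find_job_services_line_py_spec : Claim_equal_find_job_services_line_py := by
  intro fl jn si _
  show find_job_services_line_py fl jn si = find_job_services_line_py_alt fl jn si
  unfold find_job_services_line_py find_job_services_line_py_alt
  rw [pvBLoop_state0]
  cases hj : pvAFind (pvJobLine jn) fl 0 with
  | none => rfl
  | some j =>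
    dsimp only
    rw [pvBLoop_state1, pvAFind_shift pvServLine (fl.drop j) j]
    cases hs : pvAFind pvServLine (fl.drop j) 0 with
    | none => rfl
    | some k =>
      simp only [Option.map_some]
      rw [List.drop_drop]
      have h1 : j + (k + 1) = k + j + 1 := by omega
      rw [h1]
      congr 1
      push_cast
      ring
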